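-- pv_equiv track=rewrite | github.com/rorySomething/python-shorties | kenkenSolver.py | getBlockIndicesFlat
-- ===== SOURCE A (Python) =====
-- from math import isqrt
--
-- def getBlockIndicesFlat(blockX, blockY, sudokuGrid = 9):
--     """Return list of indices in a sudoku block.
--
--     block X,Y indices start from 0
--     Max grid X,Y is sqrt(sudokuGrid) - 1
--     For 9x9 sudoku, flat indexing is 0-80 in list of sudoku board
--     e.g. Block 0,0 should return [0, 1, 2, 9, 10, 11, 18, 19, 20]
--          0  1  2
--          9 10 11
--         18 19 20
--     """
--     blockSize = isqrt(sudokuGrid) # TODO Check for bad grid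
--     indices = []
--     row0 = blockX * blockSize # 0, 1, 2 -> 0, 3, 6
--     col0 = blockY * blockSize
--     for row in range(row0, row0 + blockSize):
--         for col in range(col0, col0 + blockSize):
--             indices.append(row * sudokuGrid + col)
--     return indices
-- ===== SOURCE B (Python) =====
-- from math import isqrt
--
-- def getBlockIndicesFlat(blockX, blockY, sudokuGrid = 9):
--     """Return list of indices in a sudoku block.
--
--     Builds only the top row of the block explicitly, then produces each
--     subsequent row by shifting the whole previous row down one board row
--     (adding sudokuGrid elementwise) -- no per-cell row*grid+col arithmetic.
--     Correct because consecutive rows of a block differ by exactly sudokuGrid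
--     at every position.
--     """
--     blockSize = isqrt(sudokuGrid)
--     start = blockX * blockSize * sudokuGrid + blockY * blockSize
--     row = list(range(start, start + blockSize))
--     indices = []
--     for _ in range(blockSize):
--         indices += row
--         row = [x + sudokuGrid for x in row]
--     return indices
-- ===== Notes on version B (the rewrite author's own statement) =====
-- stated objective: alternative
-- what changed: B builds only the top row of the block as an explicit range, then generates each following row by shifting the previous row list elementwise by sudokuGrid (strength reduction), instead of A's nested loops computing row*sudokuGrid+col per cell.
import Mathlib
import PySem

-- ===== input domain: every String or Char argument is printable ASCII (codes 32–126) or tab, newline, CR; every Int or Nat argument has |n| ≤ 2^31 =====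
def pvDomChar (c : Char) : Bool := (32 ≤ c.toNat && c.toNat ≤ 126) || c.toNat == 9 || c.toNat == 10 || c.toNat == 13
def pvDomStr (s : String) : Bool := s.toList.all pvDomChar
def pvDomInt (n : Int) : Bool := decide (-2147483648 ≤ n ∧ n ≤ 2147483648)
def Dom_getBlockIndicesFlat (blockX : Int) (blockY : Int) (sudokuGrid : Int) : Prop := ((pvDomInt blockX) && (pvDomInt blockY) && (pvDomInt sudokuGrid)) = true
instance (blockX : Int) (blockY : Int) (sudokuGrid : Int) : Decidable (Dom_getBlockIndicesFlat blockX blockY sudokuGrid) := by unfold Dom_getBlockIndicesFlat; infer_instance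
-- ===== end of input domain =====

-- ===== PORT A =====
-- B builds the block's top row once and derives each next row by an elementwise
-- shift of the previous row, replacing A's per-cell row*grid+col arithmetic
-- (objective: alternative, same cost).

-- math.isqrt(n) for n >= 0 is Nat.sqrt of n (n >= 0 is in Pre_; isqrt raises ValueError on negatives)
def getBlockIndicesFlat (blockX : Int) (blockY : Int) (sudokuGrid : Int) : List Int :=
  let blockSize : Int := (sudokuGrid.toNat.sqrt : Int)
  let row0 : Int := blockX * blockSize
  let col0 : Int := blockY * blockSize
  (PySem.List.pyRange row0 (row0 + blockSize) 1).foldl (fun indices row =>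
    (PySem.List.pyRange col0 (col0 + blockSize) 1).foldl (fun indices col =>
      indices ++ [row * sudokuGrid + col]) indices) []

-- ===== PORT B =====
-- the 'for _ in range(blockSize): indices += row; row = [x + sudokuGrid for x in row]' loop
def pvAltLoop (g : Int) : Nat → List Int → List Int → List Int
  | 0, _, indices => indices
  | k+1, row, indices => pvAltLoop g k (row.map (fun x => x + g)) (indices ++ row)

def getBlockIndicesFlat_alt (blockX : Int) (blockY : Int) (sudokuGrid : Int) : List Int :=
  let blockSize : Int := (sudokuGrid.toNat.sqrt : Int)
  let start : Int := blockX * blockSize * sudokuGrid + blockY * blockSize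
  pvAltLoop sudokuGrid sudokuGrid.toNat.sqrt (PySem.List.pyRange start (start + blockSize) 1) []

-- ===== PRECONDITION & SPEC =====
-- Pre_ excludes exactly the inputs on which math.isqrt (hence A) raises ValueError: negative sudokuGrid.
def Pre_getBlockIndicesFlat (blockX : Int) (blockY : Int) (sudokuGrid : Int) : Prop :=
  0 ≤ sudokuGrid
instance (blockX : Int) (blockY : Int) (sudokuGrid : Int) : Decidable (Pre_getBlockIndicesFlat blockX blockY sudokuGrid) := by unfold Pre_getBlockIndicesFlat; infer_instance
def pvWitness_getBlockIndicesFlat : Int × Int × Int := (1, 2, 9)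

def Spec_getBlockIndicesFlat (blockX : Int) (blockY : Int) (sudokuGrid : Int) (out : List Int) : Prop := out = getBlockIndicesFlat_alt blockX blockY sudokuGrid
instance (blockX : Int) (blockY : Int) (sudokuGrid : Int) (out : List Int) : Decidable (Spec_getBlockIndicesFlat blockX blockY sudokuGrid out) := by unfold Spec_getBlockIndicesFlat; infer_instance

-- ===== CLAIM (what is proved, stated in full; the proofs are below) =====
def Claim_equal_getBlockIndicesFlat : Prop := ∀ (blockX : Int) (blockY : Int) (sudokuGrid : Int), Dom_getBlockIndicesFlat blockX blockY sudokuGrid → Pre_getBlockIndicesFlat blockX blockY sudokuGrid → Spec_getBlockIndicesFlat blockX blockY sudokuGrid (getBlockIndicesFlat blockX blockY sudokuGrid)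

-- ===== LEMMAS AND PROOFS =====

-- the shift loop unrolls into k copies of the row, the r-th shifted by r*g
theorem pvAltLoop_eq (g : Int) (k : Nat) (row out : List Int) :
    pvAltLoop g k row out
      = out ++ (List.range k).flatMap (fun (r : Nat) => row.map (fun x => x + (r : Int) * g)) := by
  induction k generalizing row out with
  | zero => simp [pvAltLoop]
  | succ k ih =>
    rw [pvAltLoop, ih, List.range_succ_eq_map]
    simp only [List.flatMap_cons, List.flatMap_map, List.map_map, List.append_assoc,
      Nat.cast_zero, zero_mul]
    congr 1
    congr 1
    · simp
    · apply congrArg List.flatten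
      apply List.map_congr_left
      intro r _
      apply List.map_congr_left
      intro x _
      simp only [Function.comp_apply, Nat.succ_eq_add_one]
      push_cast
      ring

theorem getBlockIndicesFlat_eq_alt (bX bY g : Int) :
    getBlockIndicesFlat bX bY g = getBlockIndicesFlat_alt bX bY g := by
  unfold getBlockIndicesFlat getBlockIndicesFlat_alt
  set n : Nat := g.toNat.sqrt with hn
  rw [pvAltLoop_eq]
  simp only [PySem.List.foldl_append_singleton_eq_map, PySem.List.foldl_append_eq_flatMap,
    List.nil_append, PySem.List.pyRange_one]
  have h1 : (bX * (n : Int) + (n : Int) - bX * (n : Int)).toNat = n := by omega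
  have h2 : (bY * (n : Int) + (n : Int) - bY * (n : Int)).toNat = n := by omega
  have h3 : (bX * (n : Int) * g + bY * (n : Int) + (n : Int) - (bX * (n : Int) * g + bY * (n : Int))).toNat = n := by omega
  rw [h1, h2, h3, List.flatMap_map]
  apply congrArg List.flatten
  apply List.map_congr_left
  intro r _
  simp only [Function.comp_apply, List.map_map]
  apply List.map_congr_left
  intro c _
  simp only [Function.comp_apply]
  ring

-- ===== VERDICT (by name: the statement is the Claim_ definition above) =====
theorem getBlockIndicesFlat_spec : Claim_equal_getBlockIndicesFlat := by
  intro bX bY g _ _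
  exact getBlockIndicesFlat_eq_alt bX bY g
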